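-- pv_equiv track=rewrite | github.com/astr0sonic/quantum-circuit-optimizer | src/quantum_circuit/ucr_circuit_optimizer/graph.py | get_shortest_paths
-- ===== SOURCE A (Python) =====
-- def get_shortest_paths(next: list[list[int]]) -> list[list[list[int]]]:
--     """
--     Get the matrix of shortest paths between all pairs of vertices using the auxiliary matrix
--     from the Floyd-Warshall algorithm.
--
--     Args:
--         next (list[list[int]]): Auxiliary matrix for path reconstruction.
--
--     Returns:
--         list[list[list[int]]]: Matrix of shortest paths between all vertex pairs.
--     """
--     n = len(next)
--     min_paths: list[list[list[int]]] = [[[] for _ in range(n)] for _ in range(n)]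
--     for i in range(n):
--         for j in range(i, n):
--             min_paths[i][j] = get_shortest_path(i, j, next)
--             min_paths[j][i] = list(reversed(min_paths[i][j]))
--     return min_paths
--
-- def get_shortest_path(i: int, j: int, next: list[list[int]]) -> list[int]:
--     """
--     Reconstruct the shortest path between vertices i (start) and j (end) using the auxiliary matrix.
--
--     Args:
--         i (int): Start vertex.
--         j (int): End vertex.
--         next (list[list[int]]): Auxiliary matrix for path reconstruction.
--
--     Returns:
--         list[int]: List of vertices representing the shortest path.
--     """
--     path = [i]
--     next_vertex = next[i][j]
--     while next_vertex != j:
--         path.append(next_vertex)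
--         next_vertex = next[next_vertex][j]
--     if i != j:
--         path.append(j)
--     return path
-- ===== SOURCE B (Python) =====
-- def get_shortest_path(i: int, j: int, next: list[list[int]]) -> list[int]:
--     """Reconstruct the path from i to j recursively along the successor chain."""
--     k = next[i][j]
--     if k == j:
--         return [i] if i == j else [i, j]
--     return [i] + get_shortest_path(k, j, next)
--
--
-- def get_shortest_paths(next: list[list[int]]) -> list[list[list[int]]]:
--     """Pure nested comprehension: upper triangle reconstructed recursively,
--     lower triangle (and diagonal) as the reverse of the mirrored path."""
--     n = len(next)
--     return [
--         [
--             get_shortest_path(i, j, next)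
--             if i < j
--             else list(reversed(get_shortest_path(j, i, next)))
--             for j in range(n)
--         ]
--         for i in range(n)
--     ]
-- ===== Notes on version B (the rewrite author's own statement) =====
-- stated objective: alternative
-- what changed: Replaces A's preallocated matrix mutated in place over the upper triangle with a while-loop accumulator helper by a pure nested comprehension over all cells whose helper reconstructs each path by recursion on the successor chain (CLRS recurrence), mirroring the lower triangle by reversing the transposed path; Pre_ excludes matrices with a non-identity diagonal entry, where A's diagonal paths (reversed, endpoint dropped) are an accident of its half-matrix mirroring.
import Mathlib
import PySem

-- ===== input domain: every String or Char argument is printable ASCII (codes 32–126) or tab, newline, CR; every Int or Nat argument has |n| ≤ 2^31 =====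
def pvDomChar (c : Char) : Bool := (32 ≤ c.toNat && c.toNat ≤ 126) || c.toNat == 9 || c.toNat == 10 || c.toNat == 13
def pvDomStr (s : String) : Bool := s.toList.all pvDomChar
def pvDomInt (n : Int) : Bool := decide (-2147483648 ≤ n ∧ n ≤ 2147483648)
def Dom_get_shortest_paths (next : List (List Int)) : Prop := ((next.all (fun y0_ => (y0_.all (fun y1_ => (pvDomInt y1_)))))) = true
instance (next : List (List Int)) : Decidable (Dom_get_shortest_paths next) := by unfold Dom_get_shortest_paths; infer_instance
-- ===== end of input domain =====

-- B rebuilds the matrix as a pure nested comprehension (recursive path reconstruction,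
-- lower triangle mirrored by reversal) instead of A's in-place mutation with a while loop.

-- ===== PORT A =====
-- next[v][j] (Python indexing; Pre_ guarantees it never raises, so getD 0 is never taken there)
def pvIdx2 (nxt : List (List Int)) (v j : Int) : Int :=
  (((PySem.List.pyGet? nxt v).bind (fun r => PySem.List.pyGet? r j)).getD 0)

-- the 'while next_vertex != j' loop; fuel n+1 is enough on every input Pre_ admits
def gspA_loop (nxt : List (List Int)) (j : Int) : Nat → List Int → Int → List Int
  | 0, path, _ => path
  | f+1, path, nv =>
    if nv = j then path
    else gspA_loop nxt j f (path ++ [nv]) (pvIdx2 nxt nv j)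

def get_shortest_path_A (i j : Int) (nxt : List (List Int)) : List Int :=
  let path := gspA_loop nxt j (nxt.length + 1) [i] (pvIdx2 nxt i j)
  if i ≠ j then path ++ [j] else path

def get_shortest_paths (next : List (List Int)) : List (List (List Int)) :=
  let n := next.length
  let m0 := List.replicate n (List.replicate n ([] : List Int))
  (List.range n).foldl (fun m (i : Nat) =>
    (List.range' i (n - i)).foldl (fun m (j : Nat) =>
      let p := get_shortest_path_A (i : Int) (j : Int) next
      let m := m.set i ((m.getD i []).set j p)
      m.set j ((m.getD j []).set i p.reverse)) m) m0

-- ===== PORT B =====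
-- the CLRS recurrence; fuel n+1 is enough on every input Pre_ admits
def gspB (nxt : List (List Int)) (j : Int) : Nat → Int → List Int
  | 0, i => [i]
  | f+1, i =>
    let k := pvIdx2 nxt i j
    if k = j then (if i = j then [i] else [i, j])
    else i :: gspB nxt j f k

def get_shortest_path_B (i j : Int) (nxt : List (List Int)) : List Int :=
  gspB nxt j (nxt.length + 1) i

def get_shortest_paths_alt (next : List (List Int)) : List (List (List Int)) :=
  let n := next.length
  (List.range n).map (fun (i : Nat) => (List.range n).map (fun (j : Nat) =>
    if i < j then get_shortest_path_B (i : Int) (j : Int) next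
    else (get_shortest_path_B (j : Int) (i : Int) next).reverse))

-- ===== PRECONDITION & SPEC =====
-- iterate v ↦ next[v][j] m times from v (the successor chain both programs follow)
def pvChain (nxt : List (List Int)) (j : Int) : Nat → Int → Int
  | 0, v => v
  | m+1, v => pvChain nxt j m (pvIdx2 nxt v j)

-- cell read check: Python's next[v][j] does not raise (possibly negative v, Python wrap)
def pvCellOk (next : List (List Int)) (v j : Int) : Bool :=
  ((PySem.List.pyGet? next v).bind (fun r => PySem.List.pyGet? r j)).isSome

-- upper pair (i, j): the successor chain from i hits j within n+1 steps, and every cell the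
-- loop reads before the first hit (steps 0..m while no hit among steps 1..m) is a valid access
def pvPairOk (next : List (List Int)) (i j : Nat) : Bool :=
  ((List.range (next.length + 1)).any (fun m =>
      pvChain next (j : Int) (m + 1) (i : Int) == (j : Int))) &&
  ((List.range (next.length + 1)).all (fun m =>
      ((List.range m).any (fun k => pvChain next (j : Int) (k + 1) (i : Int) == (j : Int))) ||
      pvCellOk next (pvChain next (j : Int) m (i : Int)) (j : Int)))

-- Pre_ = `next` is a successor matrix A can traverse: the diagonal is the identity, and every
-- upper pair i ≤ j satisfies pvPairOk (chain reaches j, all cells read are valid accesses).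
-- Outside it A raises IndexError or loops forever — except matrices with a non-identity
-- diagonal entry whose chain still closes: there A returns, but its diagonal paths (reversed,
-- endpoint dropped) are an accident of its half-matrix mirroring, a corner no caller would
-- specify; B returns the CLRS path there (see the cite).
def Pre_get_shortest_paths (next : List (List Int)) : Prop :=
  (∀ i < next.length, pvIdx2 next (i : Int) (i : Int) = (i : Int)) ∧
  (∀ i < next.length, ∀ j < next.length, i ≤ j → pvPairOk next i j = true)
instance (next : List (List Int)) : Decidable (Pre_get_shortest_paths next) := by
  unfold Pre_get_shortest_paths; infer_instance

def pvWitness_get_shortest_paths : List (List Int) :=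
  [[0, 1, 2, 3, 4], [0, 1, 2, 3, 4], [0, 1, 2, 3, 4], [0, 1, 2, 3, 4], [0, 1, 2, 3, 4]]

def Spec_get_shortest_paths (next : List (List Int)) (out : List (List (List Int))) : Prop := out = get_shortest_paths_alt next
instance (next : List (List Int)) (out : List (List (List Int))) : Decidable (Spec_get_shortest_paths next out) := by unfold Spec_get_shortest_paths; infer_instance

-- ===== CLAIM (what is proved, stated in full; the proofs are below) =====
def Claim_equal_get_shortest_paths : Prop := ∀ (next : List (List Int)), Dom_get_shortest_paths next → Pre_get_shortest_paths next → Spec_get_shortest_paths next (get_shortest_paths next)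

-- ===== LEMMAS AND PROOFS =====

theorem loop_acc (nxt : List (List Int)) (j : Int) (f : Nat) :
    ∀ (p q : List Int) (v : Int),
      gspA_loop nxt j f (p ++ q) v = p ++ gspA_loop nxt j f q v := by
  induction f with
  | zero => intro p q v; simp [gspA_loop]
  | succ f ih =>
    intro p q v
    simp only [gspA_loop]
    split
    · rfl
    · rw [List.append_assoc]; exact ih p (q ++ [v]) _

theorem loop_eq_rec (nxt : List (List Int)) (j : Int) :
    ∀ (f : Nat) (v : Int), v ≠ j →
      (∃ m ≤ f, pvChain nxt j m v = j) →
      gspA_loop nxt j f [v] (pvIdx2 nxt v j) ++ [j] = gspB nxt j f v := by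
  intro f
  induction f with
  | zero =>
    intro v hv ⟨m, hm, hc⟩
    interval_cases m
    exact absurd hc hv
  | succ f ih =>
    intro v hv ⟨m, hm, hc⟩
    simp only [gspA_loop, gspB]
    by_cases hk : pvIdx2 nxt v j = j
    · simp [hk, hv]
    · rw [if_neg hk, if_neg hk]
      have hm' : ∃ m ≤ f, pvChain nxt j m (pvIdx2 nxt v j) = j := by
        rcases m with _ | m
        · exact absurd hc hv
        · exact ⟨m, Nat.le_of_succ_le_succ hm, hc⟩
      rw [loop_acc nxt j f [v] [pvIdx2 nxt v j]]
      simp only [List.cons_append, List.nil_append]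
      rw [ih (pvIdx2 nxt v j) hk hm']

theorem helper_eq (nxt : List (List Int)) (i j : Int)
    (hdiag : i = j → pvIdx2 nxt i i = i)
    (hreach : ∃ m ≤ nxt.length + 1, pvChain nxt j m i = j) :
    get_shortest_path_A i j nxt = get_shortest_path_B i j nxt := by
  by_cases hij : i = j
  · subst hij
    have hd := hdiag rfl
    simp [get_shortest_path_A, get_shortest_path_B, gspA_loop, gspB, hd]
  · simp only [get_shortest_path_A, get_shortest_path_B]
    rw [if_pos hij]
    exact loop_eq_rec nxt j (nxt.length + 1) i hij hreach

-- value of cell (a, b) in the finished matrix, expressed with A's helper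
def pvVal (next : List (List Int)) (a b : Nat) : List Int :=
  if a < b then get_shortest_path_A ((a : Int)) ((b : Int)) next
  else if b < a then (get_shortest_path_A ((b : Int)) ((a : Int)) next).reverse
  else (get_shortest_path_A ((a : Int)) ((a : Int)) next).reverse

-- one iteration of A's inner loop body
def pvStep (next : List (List Int)) (i j : Nat) (m : List (List (List Int))) : List (List (List Int)) :=
  let p := get_shortest_path_A ((i : Int)) ((j : Int)) next
  let m' := m.set i ((m.getD i []).set j p)
  m'.set j ((m'.getD j []).set i p.reverse)

def pvInv (n : Nat) (g : Nat → Nat → List Int) (m : List (List (List Int))) : Prop :=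
  m.length = n ∧ (∀ a, a < n → (m.getD a []).length = n) ∧
    (∀ a, a < n → ∀ b, b < n → (m.getD a []).getD b [] = g a b)

theorem pv_getD_set_eq {α : Type} (l : List α) (n : Nat) (a d : α) (h : n < l.length) :
    (l.set n a).getD n d = a := by simp [List.getD, h]

theorem pv_getD_set_ne {α : Type} (l : List α) (n m : Nat) (a d : α) (h : n ≠ m) :
    (l.set n a).getD m d = l.getD m d := by simp [List.getD, List.getElem?_set_ne h]

theorem pvInv_congr (n : Nat) (g g' : Nat → Nat → List Int) (m : List (List (List Int)))
    (h : pvInv n g m) (hg : ∀ a, a < n → ∀ b, b < n → g a b = g' a b) : pvInv n g' m := by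
  obtain ⟨h1, h2, h3⟩ := h
  exact ⟨h1, h2, fun a ha b hb => (h3 a ha b hb).trans (hg a ha b hb)⟩

theorem pvStep_inv (next : List (List Int)) (n i j : Nat) (g : Nat → Nat → List Int)
    (m : List (List (List Int))) (hi : i < n) (hj : j < n) (hij : i ≤ j)
    (hInv : pvInv n g m) :
    pvInv n (fun a b => if (a = j ∧ b = i) ∨ (a = i ∧ b = j) then pvVal next a b else g a b)
      (pvStep next i j m) := by
  obtain ⟨hL, hR, hC⟩ := hInv
  have hpv1 : pvVal next j i = (get_shortest_path_A ((i : Int)) ((j : Int)) next).reverse := by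
    rcases Nat.lt_or_ge i j with h | h
    · simp [pvVal, Nat.not_lt_of_lt h, h]
    · have hji : i = j := Nat.le_antisymm hij h
      rw [← hji]
      simp [pvVal]
  have hpv2 : i ≠ j → pvVal next i j = get_shortest_path_A ((i : Int)) ((j : Int)) next := by
    intro hne
    have h : i < j := Nat.lt_of_le_of_ne hij hne
    simp [pvVal, h]
  have hL' : (m.set i ((m.getD i []).set j
      (get_shortest_path_A ((i : Int)) ((j : Int)) next))).length = n := by simp [hL]
  refine ⟨by simp [pvStep, hL], ?_, ?_⟩
  · intro a ha
    by_cases haj : a = j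
    · rw [haj, pvStep, pv_getD_set_eq _ _ _ _ (by rw [hL']; exact hj), List.length_set]
      by_cases hji : j = i
      · rw [hji, pv_getD_set_eq _ _ _ _ (by rw [hL]; exact hi), List.length_set]
        exact hR i hi
      · rw [pv_getD_set_ne _ _ _ _ _ (fun h => hji h.symm)]
        exact hR j hj
    · rw [pvStep, pv_getD_set_ne _ _ _ _ _ (fun h => haj h.symm)]
      by_cases hai : a = i
      · rw [hai, pv_getD_set_eq _ _ _ _ (by rw [hL]; exact hi), List.length_set]
        exact hR i hi
      · rw [pv_getD_set_ne _ _ _ _ _ (fun h => hai h.symm)]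
        exact hR a ha
  · intro a ha b hb
    dsimp only
    by_cases haj : a = j
    · rw [haj, pvStep, pv_getD_set_eq _ _ _ _ (by rw [hL']; exact hj)]
      by_cases hbi : b = i
      · have hlen : i < ((m.set i ((m.getD i []).set j
            (get_shortest_path_A ((i : Int)) ((j : Int)) next))).getD j []).length := by
          by_cases hji : j = i
          · rw [hji, pv_getD_set_eq _ _ _ _ (by rw [hL]; exact hi), List.length_set,
              hR i hi]
            exact hi
          · rw [pv_getD_set_ne _ _ _ _ _ (fun h => hji h.symm), hR j hj]
            exact hi
        rw [hbi, pv_getD_set_eq _ _ _ _ hlen]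
        rw [if_pos (Or.inl ⟨rfl, rfl⟩), hpv1]
      · rw [pv_getD_set_ne _ _ _ _ _ (fun h => hbi h.symm)]
        have hcond : ¬ ((j = j ∧ b = i) ∨ (j = i ∧ b = j)) := by
          rintro (⟨_, h2⟩ | ⟨h2, h3⟩)
          · exact hbi h2
          · exact hbi (h3.trans h2)
        rw [if_neg hcond]
        by_cases hji : j = i
        · rw [hji, pv_getD_set_eq _ _ _ _ (by rw [hL]; exact hi),
            pv_getD_set_ne _ _ _ _ _ (fun h => hbi h.symm), hC i hi b hb]
        · rw [pv_getD_set_ne _ _ _ _ _ (fun h => hji h.symm), hC j hj b hb]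
    · rw [pvStep, pv_getD_set_ne _ _ _ _ _ (fun h => haj h.symm)]
      by_cases hai : a = i
      · rw [hai, pv_getD_set_eq _ _ _ _ (by rw [hL]; exact hi)]
        by_cases hbj : b = j
        · rw [hbj, pv_getD_set_eq _ _ _ _ (by rw [hR i hi]; exact hj)]
          have hij' : i ≠ j := fun h => haj (hai.trans h)
          rw [if_pos (Or.inr ⟨rfl, rfl⟩), hpv2 hij']
        · rw [pv_getD_set_ne _ _ _ _ _ (fun h => hbj h.symm), hC i hi b hb]
          have hcond : ¬ ((i = j ∧ b = i) ∨ (i = i ∧ b = j)) := by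
            rintro (⟨h1, _⟩ | ⟨_, h2⟩)
            · exact haj (hai.trans h1)
            · exact hbj h2
          rw [if_neg hcond]
      · rw [pv_getD_set_ne _ _ _ _ _ (fun h => hai h.symm), hC a ha b hb]
        have hcond : ¬ ((a = j ∧ b = i) ∨ (a = i ∧ b = j)) := by
          rintro (⟨h1, _⟩ | ⟨h1, _⟩)
          · exact haj h1
          · exact hai h1
        rw [if_neg hcond]

def pvG (next : List (List Int)) (i d : Nat) (φ : Nat → Nat → List Int) (a b : Nat) : List Int :=
  if (a = i ∧ i ≤ b ∧ b < d) ∨ (b = i ∧ i ≤ a ∧ a < d) then pvVal next a b else φ a b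

theorem pvInner (next : List (List Int)) (n i : Nat) (hi : i < n) (φ : Nat → Nat → List Int) :
    ∀ c, i + c ≤ n → ∀ m, pvInv n φ m →
      pvInv n (pvG next i (i + c) φ)
        ((List.range' i c).foldl (fun m j => pvStep next i j m) m) := by
  intro c
  induction c with
  | zero =>
    intro _ m hm
    simp only [List.range', List.foldl_nil]
    refine pvInv_congr n φ _ m hm ?_
    intro a _ b _
    rw [pvG, if_neg (by omega)]
  | succ c ih =>
    intro hc m hm
    have hconcat : List.range' i (c + 1) = List.range' i c ++ [i + c] := by
      simp [List.range'_concat]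
    rw [hconcat, List.foldl_append, List.foldl_cons, List.foldl_nil]
    have h1 := ih (by omega) m hm
    have h2 := pvStep_inv next n i (i + c) (pvG next i (i + c) φ) _ hi (by omega)
      (by omega) h1
    refine pvInv_congr n _ _ _ h2 ?_
    intro a ha b hb
    dsimp only
    by_cases hab : (a = i + c ∧ b = i) ∨ (a = i ∧ b = i + c)
    · rw [if_pos hab, pvG, if_pos (by omega)]
    · rw [if_neg hab]
      by_cases h3 : (a = i ∧ i ≤ b ∧ b < i + (c + 1)) ∨ (b = i ∧ i ≤ a ∧ a < i + (c + 1))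
      · rw [pvG, pvG, if_pos (by omega), if_pos h3]
      · rw [pvG, pvG, if_neg (by omega), if_neg h3]

def pvPhi (next : List (List Int)) (c a b : Nat) : List Int :=
  if a < c ∨ b < c then pvVal next a b else []

theorem pvOuter (next : List (List Int)) (n : Nat) :
    ∀ c, c ≤ n →
      pvInv n (pvPhi next c)
        ((List.range' 0 c).foldl
          (fun m i => (List.range' i (n - i)).foldl (fun m j => pvStep next i j m) m)
          (List.replicate n (List.replicate n ([] : List Int)))) := by
  intro c
  induction c with
  | zero =>
    intro _
    refine ⟨by simp, ?_, ?_⟩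
    · intro a ha; simp [List.getD, ha]
    · intro a ha b hb
      simp [List.getD, ha, hb, pvPhi]
  | succ c ih =>
    intro hc
    have hconcat : List.range' 0 (c + 1) = List.range' 0 c ++ [c] := by
      simp [List.range'_concat]
    rw [hconcat, List.foldl_append, List.foldl_cons, List.foldl_nil]
    have h1 := ih (by omega)
    have h2 := pvInner next n c (by omega) (pvPhi next c) (n - c) (by omega) _ h1
    rw [Nat.add_sub_cancel' (by omega : c ≤ n)] at h2
    refine pvInv_congr n _ _ _ h2 ?_
    intro a ha b hb
    by_cases h : a < c + 1 ∨ b < c + 1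
    · rw [pvPhi, if_pos h]
      by_cases h3 : (a = c ∧ c ≤ b ∧ b < n) ∨ (b = c ∧ c ≤ a ∧ a < n)
      · rw [pvG, if_pos h3]
      · rw [pvG, if_neg h3, pvPhi, if_pos (by omega)]
    · rw [pvG, if_neg (by omega), pvPhi, if_neg (by omega), pvPhi, if_neg (by omega)]

theorem pv_getD_eq_getElem {α : Type} (l : List α) (n : Nat) (d : α) (h : n < l.length) :
    l.getD n d = l[n] := by simp [List.getD, h]

theorem pv_ext {α : Type} (d : α) (l1 l2 : List α) (h : l1.length = l2.length)
    (h2 : ∀ a, a < l1.length → l1.getD a d = l2.getD a d) : l1 = l2 := by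
  apply List.ext_getElem h
  intro i h1 h1'
  have := h2 i h1
  rwa [pv_getD_eq_getElem _ _ _ h1, pv_getD_eq_getElem _ _ _ h1'] at this

-- ===== VERDICT (by name: the statement is the Claim_ definition above) =====
theorem get_shortest_paths_spec : Claim_equal_get_shortest_paths := by
  intro next _ hpre
  obtain ⟨hdiag, hreach⟩ := hpre
  unfold Spec_get_shortest_paths
  have hGS : get_shortest_paths next =
      (List.range' 0 next.length).foldl
        (fun m i => (List.range' i (next.length - i)).foldl (fun m j => pvStep next i j m) m)
        (List.replicate next.length (List.replicate next.length ([] : List Int))) := by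
    simp only [get_shortest_paths, pvStep, List.range_eq_range']
  have hM := pvOuter next next.length next.length (le_refl _)
  rw [← hGS] at hM
  obtain ⟨hL, hR, hC⟩ := hM
  have hAB : ∀ x, x < next.length → ∀ y, y < next.length → x ≤ y →
      get_shortest_path_A ((x : Int)) ((y : Int)) next
        = get_shortest_path_B ((x : Int)) ((y : Int)) next := by
    intro x hx y hy hxy
    refine helper_eq next ((x : Int)) ((y : Int)) ?_ ?_
    · intro hxy'
      have hxy'' : x = y := by exact_mod_cast hxy'
      subst hxy''
      exact hdiag x hx
    · have hpair := hreach x hx y hy hxy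
      rw [pvPairOk, Bool.and_eq_true] at hpair
      obtain ⟨m, hmem, hbeq⟩ := List.any_eq_true.1 hpair.1
      refine ⟨m + 1, ?_, by exact_mod_cast of_decide_eq_true hbeq⟩
      have := List.mem_range.1 hmem
      omega
  have hlenalt : (get_shortest_paths_alt next).length = next.length := by
    simp [get_shortest_paths_alt]
  apply pv_ext ([] : List (List Int)) _ _ (by rw [hL, hlenalt])
  intro a ha'
  have ha : a < next.length := by rwa [hL] at ha'
  have haltrow : (get_shortest_paths_alt next).getD a [] =
      (List.range next.length).map (fun j =>
        if a < j then get_shortest_path_B ((a : Int)) ((j : Int)) next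
        else (get_shortest_path_B ((j : Int)) ((a : Int)) next).reverse) := by
    rw [pv_getD_eq_getElem _ _ _ (by rw [hlenalt]; exact ha)]
    simp [get_shortest_paths_alt]
  rw [haltrow]
  apply pv_ext ([] : List Int) _ _ (by rw [hR a ha]; simp)
  intro b hb'
  have hb : b < next.length := by rw [hR a ha] at hb'; exact hb'
  rw [hC a ha b hb]
  rw [pv_getD_eq_getElem _ _ _ (by simpa using hb)]
  simp only [List.getElem_map, List.getElem_range]
  rw [pvPhi, if_pos (Or.inl ha), pvVal]
  rcases Nat.lt_trichotomy a b with h | h | h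
  · rw [if_pos h, if_pos h, hAB a ha b hb (Nat.le_of_lt h)]
  · subst h
    rw [if_neg (lt_irrefl a), if_neg (lt_irrefl a), if_neg (lt_irrefl a), hAB a ha a ha (le_refl a)]
  · rw [if_neg (Nat.not_lt_of_lt h), if_pos h, if_neg (Nat.not_lt_of_lt h), hAB b hb a ha (Nat.le_of_lt h)]
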